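-- pv_equiv track=rewrite | github.com/hstxmgzY/ColdChain | delivery/run.py | segment_trajectories
-- ===== SOURCE A (Python) =====
-- def segment_trajectories(full_traj, node_types):
--     """
--     按送货节点在 full_traj 中出现的顺序，切分成若干段：
--     - 第一段：以 depot(0) 开头，到第一个配送节点结束。
--     - 后续段：以上一配送节点开头，到本次配送节点结束。
--     """
--     segments = []
--     prev_idx = -1  # 上一次配送节点在 full_traj 中的下标
--     for idx, node in enumerate(full_traj):
--         # node_types[node] == 2 表示这是一个送货节点
--         if node_types[node] == 2:
--             if prev_idx < 0:
--                 # 第一段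
--                 seg = [0] + full_traj[:idx+1]
--             else:
--                 # 后续段
--                 seg = [full_traj[prev_idx]] + full_traj[prev_idx+1:idx+1]
--             segments.append(seg)
--             prev_idx = idx
--     return segments
-- ===== SOURCE B (Python) =====
-- def segment_trajectories(full_traj, node_types):
--     # Single pass maintaining a running buffer of elements since the last delivery
--     # node; no indices and no slicing. 'head' is the element that opens the next
--     # segment (the depot 0 before the first delivery, then the last delivery node).
--     segments = []
--     head = 0
--     buf = []
--     for node in full_traj:
--         buf.append(node)
--         if node_types[node] == 2:
--             segments.append([head] + buf)
--             head = node
--             buf = []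
--     return segments
-- ===== Notes on version B (the rewrite author's own statement) =====
-- stated objective: alternative
-- what changed: B drops A's index machinery entirely: instead of enumerate, a prev_idx register and re-slicing full_traj for every segment, it keeps a running buffer of elements since the last delivery node and emits [head]+buf when a delivery node is hit; Pre_ only excludes inputs where both programs raise KeyError.
import Mathlib
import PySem

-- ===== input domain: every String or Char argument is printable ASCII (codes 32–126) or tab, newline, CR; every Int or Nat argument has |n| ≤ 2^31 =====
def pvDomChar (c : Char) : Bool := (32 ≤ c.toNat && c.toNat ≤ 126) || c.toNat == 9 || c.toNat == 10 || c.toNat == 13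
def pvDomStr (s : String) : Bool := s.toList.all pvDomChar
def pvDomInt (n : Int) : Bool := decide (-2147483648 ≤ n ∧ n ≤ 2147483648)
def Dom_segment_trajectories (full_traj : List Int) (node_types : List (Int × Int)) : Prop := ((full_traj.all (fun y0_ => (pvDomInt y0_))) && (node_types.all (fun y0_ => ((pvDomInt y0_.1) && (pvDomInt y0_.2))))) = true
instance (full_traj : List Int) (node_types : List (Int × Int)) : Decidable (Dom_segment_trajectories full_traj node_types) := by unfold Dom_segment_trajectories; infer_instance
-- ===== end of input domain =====

-- B replaces A's index-and-slice segmentation (enumerate, prev_idx register, a fresh slice of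
-- full_traj per segment) by a single pass that keeps a running buffer of elements since the
-- last delivery node and emits [head]+buf at each delivery node (alternative, not faster).

-- ===== PORT A =====
-- dict lookup 'node_types[node]' == 2 (first match in insertion order); shared lookup primitive
def ntDelivery (node_types : List (Int × Int)) (node : Int) : Bool :=
  ((node_types.find? (fun p => p.1 == node)).map (·.2)) == some 2

-- one iteration of A's 'for idx, node in enumerate(full_traj)' loop; state = (segments, prev_idx)
def aStep (full_traj : List Int) (node_types : List (Int × Int))
    (st : List (List Int) × Int) (p : Int × Int) : List (List Int) × Int :=
  if ntDelivery node_types p.2 then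
    let seg :=
      if st.2 < 0 then
        0 :: PySem.List.slice full_traj none (some (p.1 + 1))
      else
        PySem.List.pyGetD full_traj st.2 0 ::
          PySem.List.slice full_traj (some (st.2 + 1)) (some (p.1 + 1))
    (st.1 ++ [seg], p.1)
  else st

def segment_trajectories (full_traj : List Int) (node_types : List (Int × Int)) : List (List Int) :=
  ((PySem.List.enumerate full_traj 0).foldl (aStep full_traj node_types) ([], -1)).1

-- ===== PORT B =====
-- one iteration of B's 'for node in full_traj' loop; state = (segments, head, buf)
def bStep (node_types : List (Int × Int))
    (st : List (List Int) × Int × List Int) (node : Int) : List (List Int) × Int × List Int :=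
  let buf := st.2.2 ++ [node]
  if ntDelivery node_types node then (st.1 ++ [st.2.1 :: buf], node, [])
  else (st.1, st.2.1, buf)

def segment_trajectories_alt (full_traj : List Int) (node_types : List (Int × Int)) : List (List Int) :=
  (full_traj.foldl (bStep node_types) ([], 0, [])).1

-- ===== PRECONDITION & SPEC =====
-- Pre_ excludes exactly the inputs on which Python A raises KeyError (a visited node absent
-- from node_types); Python B raises there too.
def Pre_segment_trajectories (full_traj : List Int) (node_types : List (Int × Int)) : Prop :=
  (full_traj.all (fun n => node_types.any (fun p => p.1 == n))) = true
instance (full_traj : List Int) (node_types : List (Int × Int)) : Decidable (Pre_segment_trajectories full_traj node_types) := by unfold Pre_segment_trajectories; infer_instance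

def pvWitness_segment_trajectories : List Int × (List (Int × Int)) :=
  ([0, 1, 2, 1], [(0, 1), (1, 2), (2, 0)])

def Spec_segment_trajectories (full_traj : List Int) (node_types : List (Int × Int)) (out : List (List Int)) : Prop := out = segment_trajectories_alt full_traj node_types
instance (full_traj : List Int) (node_types : List (Int × Int)) (out : List (List Int)) : Decidable (Spec_segment_trajectories full_traj node_types out) := by unfold Spec_segment_trajectories; infer_instance

-- ===== CLAIM =====
def Claim_equal_segment_trajectories : Prop := ∀ (full_traj : List Int) (node_types : List (Int × Int)), Dom_segment_trajectories full_traj node_types → Pre_segment_trajectories full_traj node_types → Spec_segment_trajectories full_traj node_types (segment_trajectories full_traj node_types)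

-- ===== LEMMAS AND PROOFS =====

-- appending the element at position k extends a slice ending at k to one ending at k+1
theorem slice_snoc (ft : List Int) (a k : Int) (h0 : 0 ≤ a) (hak : a ≤ k)
    (hk : k.toNat < ft.length) :
    PySem.List.slice ft (some a) (some (k + 1)) =
      PySem.List.slice ft (some a) (some k) ++ [ft[k.toNat]] := by
  rw [PySem.List.slice_toNat _ h0 (by omega), PySem.List.slice_toNat _ h0 (by omega)]
  have h1 : (k + 1).toNat - a.toNat = (k.toNat - a.toNat) + 1 := by omega
  rw [h1, List.take_add_one]
  congr 1
  have : (ft.drop a.toNat)[k.toNat - a.toNat]? = ft[a.toNat + (k.toNat - a.toNat)]? :=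
    List.getElem?_drop
  have h2 : a.toNat + (k.toNat - a.toNat) = k.toNat := by omega
  rw [h2] at this
  rw [this, List.getElem?_eq_getElem hk]
  rfl

theorem take_snoc (ft : List Int) (k : Int) (h0 : 0 ≤ k) (hk : k.toNat < ft.length) :
    PySem.List.slice ft none (some (k + 1)) =
      PySem.List.slice ft none (some k) ++ [ft[k.toNat]] := by
  rw [PySem.List.slice_to _ h0, PySem.List.slice_to _ (by omega)]
  have h1 : (k + 1).toNat = k.toNat + 1 := by omega
  rw [h1, List.take_add_one, List.getElem?_eq_getElem hk]
  rfl

-- loop invariant connecting A's (segments, prev_idx) state with B's (segments, head, buf) state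
theorem main_inv (ft : List Int) (nt : List (Int × Int)) :
    ∀ (l : List Int) (k : Int) (segs : List (List Int)) (prev head : Int) (buf : List Int),
      0 ≤ k → l = ft.drop k.toNat →
      (prev < 0 → head = 0 ∧ buf = PySem.List.slice ft none (some k)) →
      (0 ≤ prev → prev < k ∧ head = PySem.List.pyGetD ft prev 0 ∧
        buf = PySem.List.slice ft (some (prev + 1)) (some k)) →
      ((PySem.List.enumerate l k).foldl (aStep ft nt) (segs, prev)).1 =
        (l.foldl (bStep nt) (segs, head, buf)).1 := by
  intro l
  induction l with
  | nil => intro k segs prev head buf _ _ _ _; simp [PySem.List.enumerate_nil]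
  | cons n rest ih =>
      intro k segs prev head buf hk hl hneg hpos
      have hklen : k.toNat < ft.length := by
        by_contra h
        rw [List.drop_eq_nil_of_le (by omega)] at hl
        exact List.cons_ne_nil n rest hl
      have hdropnil : ft.drop k.toNat = n :: rest := hl.symm
      have hn : ft[k.toNat] = n := by
        have h1 : ft[k.toNat]? = some n := by
          have := (List.getElem?_drop (xs := ft) (i := k.toNat) (j := 0)).symm
          rw [hdropnil] at this; simpa using this
        exact Option.some.inj (by rw [List.getElem?_eq_getElem hklen] at h1; exact h1)
      have hrest : rest = ft.drop (k + 1).toNat := by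
        have h1 : (k + 1).toNat = k.toNat + 1 := by omega
        rw [h1, ← List.drop_drop, hdropnil]; rfl
      rw [PySem.List.enumerate_cons, List.foldl_cons, List.foldl_cons]
      by_cases hd : ntDelivery nt n
      · have hseg :
            (if prev < 0 then 0 :: PySem.List.slice ft none (some (k + 1))
             else PySem.List.pyGetD ft prev 0 ::
               PySem.List.slice ft (some (prev + 1)) (some (k + 1))) =
            head :: (buf ++ [n]) := by
          by_cases hp : prev < 0
          · obtain ⟨hh, hb⟩ := hneg hp
            rw [if_pos hp, take_snoc ft k hk hklen, hn, hh, hb]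
          · obtain ⟨hlt, hh, hb⟩ := hpos (by omega)
            rw [if_neg hp, slice_snoc ft (prev + 1) k (by omega) (by omega) hklen, hn, hh, hb]
        simp only [aStep, bStep, hd, if_true]
        rw [hseg]
        refine ih (k + 1) _ k n [] (by omega) hrest (by omega) ?_
        intro _
        refine ⟨by omega, ?_, ?_⟩
        · rw [PySem.List.pyGetD_eq_getElem ft 0 hk (by omega), hn]
        · rw [PySem.List.slice_toNat _ (by omega) (by omega)]; simp
      · simp only [aStep, bStep, hd, Bool.false_eq_true, if_false]
        refine ih (k + 1) _ prev head (buf ++ [n]) (by omega) hrest ?_ ?_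
        · intro hp
          obtain ⟨hh, hb⟩ := hneg hp
          exact ⟨hh, by rw [hb, take_snoc ft k hk hklen, hn]⟩
        · intro hp
          obtain ⟨hlt, hh, hb⟩ := hpos hp
          exact ⟨by omega, hh,
            by rw [hb, slice_snoc ft (prev + 1) k (by omega) (by omega) hklen, hn]⟩

theorem ports_agree (ft : List Int) (nt : List (Int × Int)) :
    segment_trajectories ft nt = segment_trajectories_alt ft nt := by
  unfold segment_trajectories segment_trajectories_alt
  refine main_inv ft nt ft 0 [] (-1) 0 [] le_rfl (by simp) ?_ (by omega)
  intro _
  refine ⟨rfl, ?_⟩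
  rw [PySem.List.slice_to _ le_rfl]; simp

-- ===== VERDICT =====
theorem segment_trajectories_spec : Claim_equal_segment_trajectories := by
  intro ft nt _ _
  unfold Spec_segment_trajectories
  exact ports_agree ft nt
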